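-- pv_equiv track=rewrite | github.com/riccardovacirca/grapheme | grapheme.py | binarize_grapheme_edge
-- ===== SOURCE A (Python) =====
-- DIRECTIONAL_CLASSES = [
--   (0, 0),  # Destra, Destra
--   (0, 1),  # Destra, Alto a destra
--   (0, 7),  # Destra, Basso a destra
--   (7, 7),  # Basso a destra, Basso a destra
--   (7, 0),  # Basso a destra, Destra
--   (7, 6),  # Basso a destra, Basso
--   (6, 6),  # Basso, Basso
--   (6, 7),  # Basso, Basso a destra
--   (6, 5),  # Basso, Basso a sinistra
--   (5, 5),  # Basso a sinistra, Basso a sinistra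
--   (5, 6),  # Basso a sinistra, Basso
--   (5, 4)   # Basso a sinistra, Sinistra
-- ]
--
-- def valid_sequence_format(lst):
--   in_sequence_of_ones = False
--   for i in range(len(lst)):
--       if lst[i] == 1:
--           in_sequence_of_ones = True
--       elif lst[i] == 0:
--           if in_sequence_of_ones:
--               in_sequence_of_ones = False
--           else:
--               return False
--       else:
--           return False
--   return True
--
-- def binarize_grapheme_edge(grapheme):
--   binarized_grapheme = []
--   for class_index, directional_class in enumerate(grapheme):
--       dominant, deviation = DIRECTIONAL_CLASSES[class_index]
--       binarized_class = []
--       for segment in directional_class: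
--           binarized_segment = [
--               1 if code == dominant else 0 for code in segment]
--           if valid_sequence_format(binarized_segment):
--               binarized_class.append(binarized_segment)
--       binarized_grapheme.append(binarized_class)
--   return binarized_grapheme
-- ===== SOURCE B (Python) =====
-- DIRECTIONAL_CLASSES = [
--   (0, 0), (0, 1), (0, 7),
--   (7, 7), (7, 0), (7, 6),
--   (6, 6), (6, 7), (6, 5),
--   (5, 5), (5, 6), (5, 4)
-- ]
--
--
-- def _runs(seg):
--     """Run-length encode a list into (value, count) pairs."""
--     runs = []
--     i = 0
--     n = len(seg)
--     while i < n:
--         j = i + 1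
--         while j < n and seg[j] == seg[i]:
--             j += 1
--         runs.append((seg[i], j - i))
--         i = j
--     return runs
--
--
-- def _valid(bseg):
--     # A 0/1 segment matches (1+0)*1* iff its run-length encoding starts with
--     # a run of 1s (or is empty) and every run of 0s has length exactly 1.
--     runs = _runs(bseg)
--     if not runs:
--         return True
--     if runs[0][0] != 1:
--         return False
--     return all(n == 1 for v, n in runs if v == 0)
--
--
-- def binarize_grapheme_edge(grapheme):
--     out = []
--     for (dominant, _), cls in zip(DIRECTIONAL_CLASSES, grapheme):
--         binarized = [[int(code == dominant) for code in seg] for seg in cls]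
--         out.append([b for b in binarized if _valid(b)])
--     return out
-- ===== Notes on version B (the rewrite author's own statement) =====
-- stated objective: alternative
-- what changed: The flag-tracking state machine validator is replaced by a staged run-length-encoding check (build (value,count) runs, then require the first run to be 1s and every 0-run to have length 1), and each class is binarized in one pass and filtered in a second pass instead of appending inside one loop.
import Mathlib
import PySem

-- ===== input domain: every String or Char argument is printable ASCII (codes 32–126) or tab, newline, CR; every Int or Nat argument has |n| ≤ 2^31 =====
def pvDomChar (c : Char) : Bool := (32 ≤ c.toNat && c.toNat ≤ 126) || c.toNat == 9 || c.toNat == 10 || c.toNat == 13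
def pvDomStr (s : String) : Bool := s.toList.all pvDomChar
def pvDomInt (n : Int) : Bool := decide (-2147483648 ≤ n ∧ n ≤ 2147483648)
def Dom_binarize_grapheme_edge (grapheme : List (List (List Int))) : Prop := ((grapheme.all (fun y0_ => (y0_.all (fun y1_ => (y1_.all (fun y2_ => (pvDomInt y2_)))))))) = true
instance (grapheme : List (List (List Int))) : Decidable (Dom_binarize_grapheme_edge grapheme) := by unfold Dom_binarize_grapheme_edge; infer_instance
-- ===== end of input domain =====

-- B replaces the flag state machine by a staged run-length-encoding validity
-- check and binarizes/filters each class in two passes (alternative structure).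

-- ===== PORT A =====
def DIRECTIONAL_CLASSES : List (Int × Int) :=
  [(0,0),(0,1),(0,7),(7,7),(7,0),(7,6),(6,6),(6,7),(6,5),(5,5),(5,6),(5,4)]

-- A's valid_sequence_format: the loop with its flag, early return ported as result
def vsfLoop (lst : List Int) (in_sequence_of_ones : Bool) : Bool :=
  match lst with
  | [] => true
  | x :: rest =>
    if x == 1 then vsfLoop rest true
    else if x == 0 then
      (if in_sequence_of_ones then vsfLoop rest false else false)
    else false

def valid_sequence_format (lst : List Int) : Bool := vsfLoop lst false

-- A's outer loop: class_index carried explicitly (enumerate); DIRECTIONAL_CLASSES[class_index]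
-- via pyGet? (none = IndexError, excluded by Pre_; getD value is never used inside Pre_)
def bgeLoop (class_index : Nat) (rest : List (List (List Int))) : List (List (List Int)) :=
  match rest with
  | [] => []
  | directional_class :: more =>
    let dominant := ((PySem.List.pyGet? DIRECTIONAL_CLASSES (class_index : Int)).getD (0, 0)).1
    let binarized_class := directional_class.foldl
      (fun acc segment =>
        let binarized_segment := segment.map (fun code => if code == dominant then (1 : Int) else 0)
        if valid_sequence_format binarized_segment then acc ++ [binarized_segment] else acc) []
    binarized_class :: bgeLoop (class_index + 1) more

def binarize_grapheme_edge (grapheme : List (List (List Int))) : List (List (List Int)) :=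
  bgeLoop 0 grapheme

-- ===== PORT B =====
-- run-length encoding (Source B's _runs: the inner while-loop skipping a run is the
-- takeWhile/dropWhile split of the remainder)
def altRuns (xs : List Int) : List (Int × Nat) :=
  match xs with
  | [] => []
  | x :: rest =>
    (x, (rest.takeWhile (fun y => y == x)).length + 1) ::
      altRuns (rest.dropWhile (fun y => y == x))
termination_by xs.length
decreasing_by
  simp only [List.length_cons]
  exact Nat.lt_succ_of_le (List.Sublist.length_le (List.dropWhile_sublist _))

-- Source B's _valid on a binarized segment
def altValid (b : List Int) : Bool :=
  match altRuns b with
  | [] => true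
  | (v, _) :: _ =>
    v == 1 && (altRuns b).all (fun r => r.1 != 0 || r.2 == 1)

def binarize_grapheme_edge_alt (grapheme : List (List (List Int))) : List (List (List Int)) :=
  (DIRECTIONAL_CLASSES.zip grapheme).map (fun pc =>
    ((pc.2.map (fun seg => seg.map (fun code => if code == pc.1.1 then (1 : Int) else 0))).filter altValid))

-- ===== PRECONDITION & SPEC =====
-- A raises IndexError (DIRECTIONAL_CLASSES[class_index]) when grapheme has more than 12 classes.
def Pre_binarize_grapheme_edge (grapheme : List (List (List Int))) : Prop :=
  grapheme.length ≤ 12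
instance (grapheme : List (List (List Int))) : Decidable (Pre_binarize_grapheme_edge grapheme) := by
  unfold Pre_binarize_grapheme_edge; infer_instance

def pvWitness_binarize_grapheme_edge : List (List (List Int)) := [[[0, 5], [6]], [[0, 0, 1]]]

def Spec_binarize_grapheme_edge (grapheme : List (List (List Int))) (out : List (List (List Int))) : Prop :=
  out = binarize_grapheme_edge_alt grapheme
instance (grapheme : List (List (List Int))) (out : List (List (List Int))) : Decidable (Spec_binarize_grapheme_edge grapheme out) := by unfold Spec_binarize_grapheme_edge; infer_instance

-- ===== CLAIM (what is proved, stated in full; the proofs are below) =====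
def Claim_equal_binarize_grapheme_edge : Prop := ∀ (grapheme : List (List (List Int))), Dom_binarize_grapheme_edge grapheme → Pre_binarize_grapheme_edge grapheme → Spec_binarize_grapheme_edge grapheme (binarize_grapheme_edge grapheme)

-- ===== LEMMAS AND PROOFS =====

-- A's state machine skips a block of 1s, ending with the flag set
theorem vsfLoop_ones : ∀ (t : List Int), (∀ y ∈ t, y = 1) →
    ∀ (r : List Int), vsfLoop (t ++ r) true = vsfLoop r true := by
  intro t
  induction t with
  | nil => intro _ r; rfl
  | cons a t ih =>
    intro h r
    have ha : a = 1 := h a (by simp)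
    subst ha
    simp only [List.cons_append, vsfLoop, if_pos]
    exact ih (fun y hy => h y (by simp [hy])) r

-- altValid on a list starting with 1 is the run check on all its runs
theorem altValid_one (r3 : List Int) :
    altValid ((1 : Int) :: r3) =
      (altRuns ((1 : Int) :: r3)).all (fun p => p.1 != 0 || p.2 == 1) := by
  unfold altValid
  have hR : altRuns ((1 : Int) :: r3) =
      (1, (r3.takeWhile (fun y => y == (1 : Int))).length + 1) ::
        altRuns (r3.dropWhile (fun y => y == (1 : Int))) := by
    simp [altRuns]
  rw [hR]
  simp

-- joint characterisation of A's state machine (both flag values) by B's runs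
theorem vsf_runs : ∀ (n : Nat) (r : List Int), r.length ≤ n →
    r.all (fun x => x == 0 || x == 1) = true →
    (vsfLoop r true = (altRuns r).all (fun p => p.1 != 0 || p.2 == 1)) ∧
    (vsfLoop r false = altValid r) := by
  intro n
  induction n with
  | zero =>
    intro r hlen _
    have : r = [] := List.length_eq_zero_iff.mp (Nat.le_zero.mp hlen)
    subst this
    exact ⟨by simp [vsfLoop, altRuns], by simp [vsfLoop, altValid, altRuns]⟩
  | succ n ih =>
    intro r hlen hall
    match r with
    | [] => exact ⟨by simp [vsfLoop, altRuns], by simp [vsfLoop, altValid, altRuns]⟩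
    | x :: r2 =>
      simp only [List.all_cons, Bool.and_eq_true] at hall
      have hall2 : r2.all (fun x => x == 0 || x == 1) = true := hall.2
      have hlen2 : r2.length ≤ n := by simp at hlen; omega
      have hx : x = 0 ∨ x = 1 := by
        rcases Bool.or_eq_true_iff.mp hall.1 with h | h
        · exact Or.inl (by simpa using h)
        · exact Or.inr (by simpa using h)
      rcases hx with hx | hx
      · subst hx
        constructor
        · -- vsfLoop (0 :: r2) true = vsfLoop r2 false; case on the head of r2
          have hL : vsfLoop ((0 : Int) :: r2) true = vsfLoop r2 false := by
            simp [vsfLoop]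
          rw [hL]
          match r2, hall2, hlen2 with
          | [], _, _ => simp [vsfLoop, altRuns]
          | z :: r3, hall2, hlen2 =>
            simp only [List.all_cons, Bool.and_eq_true] at hall2
            have hz : z = 0 ∨ z = 1 := by
              rcases Bool.or_eq_true_iff.mp hall2.1 with h | h
              · exact Or.inl (by simpa using h)
              · exact Or.inr (by simpa using h)
            rcases hz with hz | hz
            · subst hz
              have : vsfLoop ((0 : Int) :: r3) false = false := by simp [vsfLoop]
              rw [this]
              simp [altRuns, List.takeWhile]
            · subst hz
              have hIH := (ih ((1 : Int) :: r3) hlen2 (by simpa using hall2)).2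
              rw [hIH]
              have hR : altRuns ((0 : Int) :: 1 :: r3) =
                  (0, 1) :: altRuns ((1 : Int) :: r3) := by
                simp [altRuns, List.takeWhile, List.dropWhile]
              rw [hR, altValid_one]
              simp
        · -- leading 0 with flag down: both reject
          simp [vsfLoop, altValid, altRuns]
      · subst hx
        -- split r2 into its leading run of 1s and the remainder
        have hsplit : r2 = r2.takeWhile (fun y => y == (1 : Int)) ++
            r2.dropWhile (fun y => y == (1 : Int)) := (List.takeWhile_append_dropWhile).symm
        have htones : ∀ y ∈ r2.takeWhile (fun y => y == (1 : Int)), y = (1 : Int) := by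
          intro y hy
          have := List.mem_takeWhile_imp hy
          simpa using this
        have hskip : vsfLoop r2 true =
            vsfLoop (r2.dropWhile (fun y => y == (1 : Int))) true := by
          conv_lhs => rw [hsplit]
          exact vsfLoop_ones _ htones _
        have hdall : (r2.dropWhile (fun y => y == (1 : Int))).all
            (fun x => x == 0 || x == 1) = true := by
          apply List.all_eq_true.mpr
          intro y hy
          exact List.all_eq_true.mp hall2 y
            (List.Sublist.mem hy (List.dropWhile_sublist _))
        have hdlen : (r2.dropWhile (fun y => y == (1 : Int))).length ≤ n :=
          le_trans (List.Sublist.length_le (List.dropWhile_sublist _)) hlen2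
        have hIH := (ih _ hdlen hdall).1
        have hR : altRuns ((1 : Int) :: r2) =
            (1, (r2.takeWhile (fun y => y == (1 : Int))).length + 1) ::
              altRuns (r2.dropWhile (fun y => y == (1 : Int))) := by
          simp [altRuns]
        have hstep : vsfLoop ((1 : Int) :: r2) true = vsfLoop r2 true := by
          simp [vsfLoop]
        have hstepf : vsfLoop ((1 : Int) :: r2) false = vsfLoop r2 true := by
          simp [vsfLoop]
        constructor
        · rw [hstep, hskip, hIH, hR]
          simp
        · rw [hstepf, hskip, hIH, altValid_one, hR]
          simp

-- on 0/1 lists, A's state machine agrees with B's run-length check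
theorem vsf_eq_altValid (b : List Int)
    (h : b.all (fun x => x == 0 || x == 1) = true) :
    valid_sequence_format b = altValid b :=
  (vsf_runs b.length b le_rfl h).2

theorem bin_all01 (dom : Int) (seg : List Int) :
    (seg.map (fun code => if code == dom then (1 : Int) else 0)).all
      (fun x => x == 0 || x == 1) = true := by
  simp [List.all_map]
  intro x _
  by_cases h : x = dom <;> simp [h]

-- the outer loop of A equals B's zip-map, generalised over the running index
theorem bgeLoop_eq (g : List (List (List Int))) : ∀ (idx : Nat),
    idx + g.length ≤ 12 →
    bgeLoop idx g =
      ((DIRECTIONAL_CLASSES.drop idx).zip g).map (fun pc =>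
        ((pc.2.map (fun seg => seg.map (fun c => if c == pc.1.1 then (1 : Int) else 0))).filter altValid)) := by
  induction g with
  | nil => intro idx _; simp [bgeLoop]
  | cons cls more ih =>
    intro idx hlen
    have hidx : idx < DIRECTIONAL_CLASSES.length := by
      simp [DIRECTIONAL_CLASSES]; simp at hlen; omega
    have hget : PySem.List.pyGet? DIRECTIONAL_CLASSES (idx : Int) =
        some (DIRECTIONAL_CLASSES[idx]) := by
      rw [PySem.List.pyGet?_natCast]
      exact List.getElem?_eq_getElem hidx
    have hdrop : DIRECTIONAL_CLASSES.drop idx =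
        DIRECTIONAL_CLASSES[idx] :: DIRECTIONAL_CLASSES.drop (idx + 1) :=
      List.drop_eq_getElem_cons hidx
    simp only [bgeLoop, hget, Option.getD_some, hdrop, List.zip_cons_cons, List.map_cons]
    congr 1
    · rw [PySem.List.foldl_append_if
            (p := fun (seg : List Int) => valid_sequence_format (seg.map (fun code => if code == DIRECTIONAL_CLASSES[idx].1 then (1 : Int) else 0)))
            (f := fun (seg : List Int) => seg.map (fun code => if code == DIRECTIONAL_CLASSES[idx].1 then (1 : Int) else 0))]
      simp only [List.nil_append, List.filter_map]
      congr 1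
      apply List.filter_congr
      intro seg _
      simp only [Function.comp]
      exact vsf_eq_altValid _ (bin_all01 _ _)
    · rw [ih (idx + 1) (by simp at hlen ⊢; omega)]

-- ===== VERDICT (by name: the statement is the Claim_ definition above) =====
theorem binarize_grapheme_edge_spec : Claim_equal_binarize_grapheme_edge := by
  intro g _ hpre
  unfold Spec_binarize_grapheme_edge binarize_grapheme_edge binarize_grapheme_edge_alt
  rw [bgeLoop_eq g 0 (by simpa [Pre_binarize_grapheme_edge] using hpre)]
  rfl
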